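-- pv_equiv track=rewrite | github.com/MohammadAbufard/SocialNetworksProgram | network_functions.py | invert_network
-- ===== SOURCE A (Python) =====
-- from typing import List, Tuple, Dict, TextIO
--
-- def invert_network(person_to_networks: Dict[str, List[str]]) \
--                     -> Dict[str, List[str]]:
--
--     '''
--     Return a dictionary in the form of network to people based on the
--     given person_to_networks dictionary. The keys of the dictionary
--     are unique network names and the values are alphabetically sorted
--     lists of people who belong to the network in firstname-lastname format.
--
--     >>> param = {}
--     >>> invert_network(param)
--     {}
--     >>> param = {'Claire Dunphy': ['Parent Teacher Association'], \
--                 'Manny Delgado': ['Chess Club'], 'Mitchell Pritchett': \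
--                 ['Law Association'], 'Alex Dunphy': ['Chess Club', \
--                 'Orchestra'], 'Cameron Tucker': ['Clown School', \
--                 'Wizard of Oz Fan Club'], 'Phil Dunphy': \
--                 ['Real Estate Association'], 'Gloria Pritchett': \
--                 ['Parent Teacher Association']}
--     >>> invert_network(param)
--     {'Parent Teacher Association': ['Claire Dunphy', 'Gloria Pritchett'], \
--     'Chess Club': ['Alex Dunphy', 'Manny Delgado'], 'Law Association': \
--     ['Mitchell Pritchett'], 'Orchestra': ['Alex Dunphy'], 'Clown School': \
--     ['Cameron Tucker'], 'Wizard of Oz Fan Club': ['Cameron Tucker'], \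
--     'Real Estate Association': ['Phil Dunphy']} \
--     >>> param = {'Manny Delgado': ['Chess Club'], 'Cameron Tucker': \
--                 ['Clown School', 'Wizard of Oz Fan Club'], 'Gloria Pritchett':\
--                 ['Parent Teacher Association'], 'moe ahmed': \
--                 ['Parent Teacher Association', 'Law Association', 'Chess Club',\
--                 'Orchestra', 'Clown School', 'Wizard of Oz Fan Club', \
--                 'Real Estate Association']}
--     >>> invert_network(param)
--     {'Chess Club': ['Manny Delgado', 'moe ahmed'], 'Clown School': \
--     ['Cameron Tucker', 'moe ahmed'], 'Wizard of Oz Fan Club': \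
--     ['Cameron Tucker', 'moe ahmed'], 'Parent Teacher Association': \
--     ['Gloria Pritchett', 'moe ahmed'], 'Law Association': ['moe ahmed'], \
--     'Orchestra': ['moe ahmed'], 'Real Estate Association': ['moe ahmed']} \
--     >>> param = {'Manny Delgado': ['Chess Club'], 'Cameron Tucker': \
--     ['Clown School'], 'Gloria Pritchett': ['Parent Teacher Association']} \
--     >>> invert_network(param)
--     {'Chess Club': ['Manny Delgado'], 'Clown School': ['Cameron Tucker'], \
--     'Parent Teacher Association': ['Gloria Pritchett']}
--     >>> param = {'Manny Delgado': ['Chess Club']}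
--     >>> invert_network(param)
--     {'Chess Club': ['Manny Delgado']}
--     '''
--
--     network_names = []
--     network_to_people = {}
--     for key in person_to_networks:
--         if not key in network_names:
--             network_names.append(person_to_networks[key])
--
--     for index in network_names:
--         for network in index:
--             if not network in network_to_people:
--                 network_to_people[network] = []
--
--     for network in network_to_people:
--         for key in person_to_networks:
--             if network in person_to_networks[key]:
--                 network_to_people[network].append(key)
--                 network_to_people[network].sort()
--
--     return network_to_people
-- ===== SOURCE B (Python) =====
-- def invert_network(person_to_networks):
--     network_to_people = {}
--     for person, networks in person_to_networks.items():
--         for network in dict.fromkeys(networks):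
--             network_to_people.setdefault(network, []).append(person)
--     return {network: sorted(people)
--             for network, people in network_to_people.items()}
-- ===== Notes on version B (the rewrite author's own statement) =====
-- stated objective: faster
-- what changed: B replaces A's three passes (collect network lists, pre-seed keys, then for each network rescan every person and re-sort the list after every single append) by one pass over the items that groups people per network via setdefault, followed by a single sort per network.
import Mathlib
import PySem

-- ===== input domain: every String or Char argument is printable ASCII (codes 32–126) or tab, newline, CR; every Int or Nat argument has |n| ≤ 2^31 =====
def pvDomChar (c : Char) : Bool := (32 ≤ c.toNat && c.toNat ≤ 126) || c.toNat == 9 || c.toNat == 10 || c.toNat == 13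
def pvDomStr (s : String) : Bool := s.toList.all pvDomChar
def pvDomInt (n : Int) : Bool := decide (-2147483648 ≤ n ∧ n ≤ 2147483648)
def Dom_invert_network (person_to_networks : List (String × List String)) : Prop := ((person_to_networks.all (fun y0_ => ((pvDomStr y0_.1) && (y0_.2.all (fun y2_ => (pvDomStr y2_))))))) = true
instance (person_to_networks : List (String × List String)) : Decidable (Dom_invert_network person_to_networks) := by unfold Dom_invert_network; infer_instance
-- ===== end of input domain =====

-- B groups people per network in ONE pass (setdefault+append) and sorts each list once at the end,
-- instead of A's per-network rescan of every person with a re-sort after every single append.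

-- ===== PORT A =====
def invert_network (person_to_networks : List (String × List String)) : List (String × List String) :=
  -- loop 1: Python's `key in network_names` compares a str against a list of LISTS of str;
  -- that comparison is always False in Python, so the append always runs (exact).
  let network_names : List (List String) :=
    person_to_networks.foldl (fun acc kv => acc ++ [kv.2]) []
  -- loop 2: pre-seed every network name with an empty list
  let network_to_people : PySem.Dict String (List String) :=
    network_names.foldl (fun d index =>
      index.foldl (fun d network =>
        if d.contains network then d else d.insert network []) d) PySem.Dict.empty
  -- loop 3: Python iterates the dict's keys while mutating only its VALUES, so the key
  -- sequence is fixed; we take that key list up front (exact).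
  let final : PySem.Dict String (List String) :=
    network_to_people.keys.foldl (fun d network =>
      person_to_networks.foldl (fun d kv =>
        if kv.2.contains network then
          d.modify network [] (fun ppl => PySem.List.sorted (ppl ++ [kv.1]) (fun x => x))
        else d) d) network_to_people
  final.items

-- ===== PORT B =====
def invert_network_alt (person_to_networks : List (String × List String)) : List (String × List String) :=
  let network_to_people : PySem.Dict String (List String) :=
    person_to_networks.foldl (fun d kv =>
      (PySem.List.dedup kv.2).foldl (fun d network =>
        d.modify network [] (fun ppl => ppl ++ [kv.1])) d)
      PySem.Dict.empty
  network_to_people.items.map (fun r => (r.1, PySem.List.sorted r.2 (fun x => x)))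

-- ===== PRECONDITION & SPEC =====
def Spec_invert_network (person_to_networks : List (String × List String)) (out : List (String × List String)) : Prop := out = invert_network_alt person_to_networks
instance (person_to_networks : List (String × List String)) (out : List (String × List String)) : Decidable (Spec_invert_network person_to_networks out) := by unfold Spec_invert_network; infer_instance

-- ===== CLAIM (what is proved, stated in full; the proofs are below) =====
def Claim_equal_invert_network : Prop := ∀ (person_to_networks : List (String × List String)), Dom_invert_network person_to_networks → Spec_invert_network person_to_networks (invert_network person_to_networks)

-- ===== LEMMAS AND PROOFS =====

-- people (in input order) whose network list contains k
def pvPersons (p : List (String × List String)) (k : String) : List String :=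
  (p.filter (fun kv => kv.2.contains k)).map (·.1)

-- the common normal form both ports reach
def pvTarget (p : List (String × List String)) : List (String × List String) :=
  (PySem.Set.ofList (p.flatMap (·.2))).map
    (fun k => (k, PySem.List.sorted (pvPersons p k) (fun x => x)))

-- `update` ignores repetitions of elements already in the set
theorem pv_update_filter (u : List String) :
    ∀ (s : PySem.Set String) (y : String), y ∈ s →
      PySem.Set.update s (u.filter (fun z => !(z == y))) = PySem.Set.update s u := by
  induction u with
  | nil => intro s y _; rfl
  | cons x u ih =>
    intro s y hy
    by_cases hxy : x = y
    · subst hxy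
      rw [List.filter_cons, if_neg (by simp)]
      rw [PySem.Set.update_cons, PySem.Set.add_of_mem hy]
      exact ih s x hy
    · rw [List.filter_cons, if_pos (by simpa using hxy)]
      rw [PySem.Set.update_cons, PySem.Set.update_cons]
      exact ih (s.add x) y ((PySem.Set.mem_add s x y).mpr (Or.inl hy))

theorem pv_update_ofList (l : List String) :
    ∀ s : PySem.Set String, PySem.Set.update s (PySem.Set.ofList l) = PySem.Set.update s l := by
  induction l with
  | nil => intro s; rfl
  | cons x l ih =>
    intro s
    rw [PySem.Set.ofList_cons, PySem.Set.update_cons, PySem.Set.update_cons]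
    have hx : x ∈ s.add x := (PySem.Set.mem_add s x x).mpr (Or.inr rfl)
    calc (s.add x).update ((PySem.Set.ofList l).discard x)
        = (s.add x).update ((PySem.Set.ofList l).filter (fun z => !(z == x))) := rfl
      _ = (s.add x).update (PySem.Set.ofList l) := pv_update_filter _ _ _ hx
      _ = (s.add x).update l := ih _

theorem pv_update_flatMap_dedup (p : List (String × List String)) :
    ∀ s : PySem.Set String,
      PySem.Set.update s (p.flatMap (fun kv => PySem.List.dedup kv.2)) =
      PySem.Set.update s (p.flatMap (·.2)) := by
  induction p with
  | nil => intro s; rfl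
  | cons kv p ih =>
    intro s
    simp only [List.flatMap_cons, PySem.Set.update_append]
    rw [PySem.List.dedup_eq_ofList, pv_update_ofList, ih]

-- loop 2 of A: keys accumulate like a set, every value stays at its getD-default []
theorem pvA2a (l : List String) :
    ∀ d : PySem.Dict String (List String),
      (l.foldl (fun d net => if d.contains net then d else d.insert net []) d).keys =
        PySem.Set.update d.keys l := by
  induction l with
  | nil => intro d; rfl
  | cons x l ih =>
    intro d
    rw [PySem.Set.update_cons, List.foldl_cons]
    by_cases hc : d.contains x = true
    · rw [if_pos hc, ih, PySem.Set.add_of_mem ((PySem.Dict.contains_iff_mem_keys d x).mp hc)]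
    · rw [if_neg hc, ih, PySem.Dict.keys_insert_of_not_contains d [] (by simpa using hc),
        PySem.Set.add_of_not_mem (fun hm => hc ((PySem.Dict.contains_iff_mem_keys d x).mpr hm))]

theorem pvA2b (l : List String) :
    ∀ (d : PySem.Dict String (List String)) (k : String),
      (l.foldl (fun d net => if d.contains net then d else d.insert net []) d).getD k [] =
        d.getD k [] := by
  induction l with
  | nil => intro d k; rfl
  | cons x l ih =>
    intro d k
    rw [List.foldl_cons]
    by_cases hc : d.contains x = true
    · rw [if_pos hc, ih]
    · rw [if_neg hc, ih, PySem.Dict.getD_insert]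
      split_ifs with hk
      · subst hk; exact (PySem.Dict.getD_of_not_contains d [] (by simpa using hc)).symm
      · rfl

-- sorting after every append = sorting once at the end
theorem pvS1 (l : List (String × List String)) :
    ∀ acc : List String,
      l.foldl (fun a kv => PySem.List.sorted (a ++ [kv.1]) (fun x => x))
        (PySem.List.sorted acc (fun x => x)) =
      PySem.List.sorted (acc ++ l.map (·.1)) (fun x => x) := by
  induction l with
  | nil => intro acc; simp
  | cons kv l ih =>
    intro acc
    rw [List.foldl_cons,
      PySem.List.sorted_eq_sorted_of_perm _ (acc ++ [kv.1]) _ (fun _ _ h => h)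
        ((PySem.List.sorted_perm acc (fun x => x) false).append_right [kv.1]),
      ih (acc ++ [kv.1])]
    simp

-- loop 3 of A, inner pass for one network
def pvInner (p : List (String × List String)) (net : String)
    (d : PySem.Dict String (List String)) : PySem.Dict String (List String) :=
  p.foldl (fun d kv =>
    if kv.2.contains net then
      d.modify net [] (fun ppl => PySem.List.sorted (ppl ++ [kv.1]) (fun x => x))
    else d) d

theorem pvA3a (net : String) (l : List (String × List String)) :
    ∀ d : PySem.Dict String (List String),
      (pvInner l net d).getD net [] =
        (l.filter (fun kv => kv.2.contains net)).foldl
          (fun a kv => PySem.List.sorted (a ++ [kv.1]) (fun x => x)) (d.getD net []) := by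
  induction l with
  | nil => intro d; rfl
  | cons kv l ih =>
    intro d
    rw [pvInner, List.foldl_cons, List.filter_cons]
    by_cases h : kv.2.contains net = true
    · rw [if_pos h, if_pos h, List.foldl_cons, ← pvInner, ih, PySem.Dict.getD_modify_self]
    · rw [if_neg h, if_neg h, ← pvInner, ih]

theorem pvA3b (net : String) (l : List (String × List String)) :
    ∀ (d : PySem.Dict String (List String)) (k : String), k ≠ net →
      (pvInner l net d).getD k [] = d.getD k [] := by
  induction l with
  | nil => intro d k _; rfl
  | cons kv l ih =>
    intro d k hk
    rw [pvInner, List.foldl_cons]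
    by_cases h : kv.2.contains net = true
    · rw [if_pos h, ← pvInner, ih _ _ hk, PySem.Dict.getD_modify_of_ne _ _ _ hk]
    · rw [if_neg h, ← pvInner, ih _ _ hk]

theorem pvA3c (net : String) (l : List (String × List String)) :
    ∀ d : PySem.Dict String (List String), net ∈ d.keys →
      (pvInner l net d).keys = d.keys := by
  induction l with
  | nil => intro d _; rfl
  | cons kv l ih =>
    intro d hnet
    rw [pvInner, List.foldl_cons]
    by_cases h : kv.2.contains net = true
    · have hkeys : (d.modify net []
          (fun ppl => PySem.List.sorted (ppl ++ [kv.1]) (fun x => x))).keys = d.keys := by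
        rw [PySem.Dict.keys_modify,
          PySem.Dict.keys_insert_of_contains _ _ ((PySem.Dict.contains_iff_mem_keys d net).mpr hnet)]
      rw [if_pos h, ← pvInner, ih _ (by rw [hkeys]; exact hnet), hkeys]
    · rw [if_neg h, ← pvInner, ih _ hnet]

-- loop 3 of A, outer pass over the (distinct, present) keys
theorem pvA4 (p : List (String × List String)) (K : List String) :
    ∀ d : PySem.Dict String (List String), K.Nodup → (∀ k ∈ K, k ∈ d.keys) →
      (K.foldl (fun d net => pvInner p net d) d).keys = d.keys ∧
      ∀ k, (K.foldl (fun d net => pvInner p net d) d).getD k [] =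
        if k ∈ K then
          (p.filter (fun kv => kv.2.contains k)).foldl
            (fun a kv => PySem.List.sorted (a ++ [kv.1]) (fun x => x)) (d.getD k [])
        else d.getD k [] := by
  induction K with
  | nil =>
    intro d _ _
    exact ⟨rfl, fun k => by simp⟩
  | cons net K ih =>
    intro d hnod hsub
    have hnet : net ∈ d.keys := hsub net List.mem_cons_self
    have hnodc := List.nodup_cons.mp hnod
    have hkeys : (pvInner p net d).keys = d.keys := pvA3c net p d hnet
    have ihres := ih (pvInner p net d) hnodc.2
      (fun k hk => by rw [hkeys]; exact hsub k (List.mem_cons_of_mem _ hk))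
    rw [List.foldl_cons]
    refine ⟨ihres.1.trans hkeys, fun k => ?_⟩
    rw [ihres.2 k]
    by_cases hkK : k ∈ K
    · have hkne : k ≠ net := fun e => hnodc.1 (e ▸ hkK)
      rw [if_pos hkK, if_pos (List.mem_cons_of_mem _ hkK), pvA3b net p _ _ hkne]
    · by_cases hknet : k = net
      · subst hknet
        rw [if_neg hkK, if_pos List.mem_cons_self, pvA3a]
      · rw [if_neg hkK, if_neg (by simp [hknet, hkK]), pvA3b net p _ _ hknet]

theorem pvA_eq_target (p : List (String × List String)) : invert_network p = pvTarget p := by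
  have hnn : (p.foldl (fun acc kv => acc ++ [kv.2]) ([] : List (List String))) = p.map (·.2) := by
    rw [PySem.List.foldl_append_singleton_eq_map, List.nil_append]
  have hflat : ((p.map (·.2)).foldl (fun d index =>
        index.foldl (fun d network => if d.contains network then d else d.insert network []) d)
        (PySem.Dict.empty : PySem.Dict String (List String))) =
      (p.flatMap (·.2)).foldl (fun d network =>
        if d.contains network then d else d.insert network []) PySem.Dict.empty := by
    rw [← List.foldl_flatten, ← List.flatMap_def]
  show ((((p.foldl (fun acc kv => acc ++ [kv.2]) ([] : List (List String))).foldl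
      (fun d index => index.foldl (fun d network =>
        if d.contains network then d else d.insert network []) d)
      (PySem.Dict.empty : PySem.Dict String (List String))).keys.foldl
        (fun d net => pvInner p net d)
      ((p.foldl (fun acc kv => acc ++ [kv.2]) ([] : List (List String))).foldl
      (fun d index => index.foldl (fun d network =>
        if d.contains network then d else d.insert network []) d)
      (PySem.Dict.empty : PySem.Dict String (List String)))).items) = pvTarget p
  rw [hnn, hflat]
  set L : List String := p.flatMap (·.2) with hL
  set d0 : PySem.Dict String (List String) :=
    L.foldl (fun d net => if d.contains net then d else d.insert net []) PySem.Dict.empty with hd0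
  have hkeys0 : d0.keys = PySem.Set.ofList L := by
    rw [hd0, pvA2a, PySem.Dict.keys_empty, PySem.Set.update_nil_left]
  have hget0 : ∀ k, d0.getD k [] = [] := fun k => by
    rw [hd0, pvA2b, PySem.Dict.getD_empty]
  have hnod0 : d0.keys.Nodup := by rw [hkeys0]; exact PySem.Set.nodup_ofList L
  obtain ⟨hkeysF, hgetF⟩ := pvA4 p d0.keys d0 hnod0 (fun k hk => hk)
  rw [PySem.Dict.items_eq_map_keys _ (by rw [hkeysF]; exact hnod0) [], hkeysF,
    List.map_congr_left (fun k hk => ?_), hkeys0, pvTarget]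
  have h0 : (PySem.List.sorted ([] : List String) (fun x => x)) = [] := rfl
  have hs := pvS1 (p.filter (fun kv => kv.2.contains k)) []
  rw [h0, List.nil_append] at hs
  rw [hgetF k, if_pos hk, hget0 k, hs, pvPersons]

-- B's nested loop flattened to one fold over (network, person) pairs
theorem pvB1 (p : List (String × List String)) :
    ∀ d : PySem.Dict String (List String),
      p.foldl (fun d kv =>
        (PySem.List.dedup kv.2).foldl (fun d network =>
          d.modify network [] (fun ppl => ppl ++ [kv.1])) d) d =
      (p.flatMap (fun kv => (PySem.List.dedup kv.2).map (fun net => (net, kv.1)))).foldl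
        (fun d r => d.modify r.1 [] (fun ppl => ppl ++ [r.2])) d := by
  induction p with
  | nil => intro d; rfl
  | cons kv p ih =>
    intro d
    rw [List.foldl_cons, List.flatMap_cons, List.foldl_append, List.foldl_map]
    exact ih _

-- filtering a Nodup list for one element
theorem pvN1 (k : String) (t : List String) (h : t.Nodup) :
    t.filter (fun x => x == k) = if k ∈ t then [k] else [] := by
  induction t with
  | nil => simp
  | cons x t ih =>
    have hx := List.nodup_cons.mp h
    rw [List.filter_cons]
    by_cases hxk : x = k
    · subst hxk
      rw [if_pos (by simp), ih hx.2, if_neg hx.1, if_pos List.mem_cons_self]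
    · rw [if_neg (by simpa using hxk), ih hx.2]
      have hkx : ¬ k = x := fun e => hxk e.symm
      by_cases hkt : k ∈ t
      · rw [if_pos hkt, if_pos (List.mem_cons_of_mem _ hkt)]
      · rw [if_neg hkt, if_neg (by simp [List.mem_cons, hkx, hkt])]

theorem pvB2 (k : String) (p : List (String × List String)) :
    ((p.flatMap (fun kv => (PySem.List.dedup kv.2).map (fun net => (net, kv.1)))).filter
        (fun r => r.1 == k)).map (·.2) = pvPersons p k := by
  induction p with
  | nil => rfl
  | cons kv p ih =>
    rw [List.flatMap_cons, List.filter_append, List.map_append, ih]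
    have hseg : (((PySem.List.dedup kv.2).map (fun net => (net, kv.1))).filter
        (fun r => r.1 == k)).map (·.2) = if kv.2.contains k then [kv.1] else [] := by
      rw [List.filter_map]
      have hcomp : ((fun r : String × String => r.1 == k) ∘ (fun net => (net, kv.1))) =
          (fun net => net == k) := rfl
      rw [hcomp, pvN1 k _ (PySem.List.nodup_dedup kv.2)]
      by_cases hm : k ∈ kv.2
      · rw [if_pos ((PySem.List.mem_dedup kv.2 k).mpr hm), if_pos (List.contains_iff_mem.mpr hm)]
        rfl
      · rw [if_neg (fun hh => hm ((PySem.List.mem_dedup kv.2 k).mp hh)),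
          if_neg (fun hc => hm (List.contains_iff_mem.mp hc))]
        rfl
    rw [hseg]
    simp only [pvPersons, List.filter_cons]
    by_cases hc : kv.2.contains k = true
    · rw [if_pos hc, if_pos hc, List.map_cons, List.singleton_append]
    · rw [if_neg hc, if_neg hc, List.nil_append]

theorem pvB_eq_target (p : List (String × List String)) : invert_network_alt p = pvTarget p := by
  show ((p.foldl (fun d kv => (PySem.List.dedup kv.2).foldl (fun d network =>
      d.modify network [] (fun ppl => ppl ++ [kv.1])) d)
      (PySem.Dict.empty : PySem.Dict String (List String))).items.map
        (fun r => (r.1, PySem.List.sorted r.2 (fun x => x)))) = pvTarget p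
  rw [pvB1]
  set q : List (String × String) :=
    p.flatMap (fun kv => (PySem.List.dedup kv.2).map (fun net => (net, kv.1))) with hq
  set dB : PySem.Dict String (List String) :=
    q.foldl (fun d r => d.modify r.1 [] (fun ppl => ppl ++ [r.2])) PySem.Dict.empty with hdB
  have hqmap : q.map (·.1) = p.flatMap (fun kv => PySem.List.dedup kv.2) := by
    rw [hq, List.map_flatMap]
    simp [List.map_map, Function.comp_def]
  have hkeys : dB.keys = PySem.Set.ofList (p.flatMap (·.2)) := by
    rw [hdB, PySem.Dict.keys_foldl_modify_key, PySem.Dict.keys_empty, PySem.Set.update_nil_left,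
      hqmap, ← PySem.Set.update_nil_left, pv_update_flatMap_dedup, PySem.Set.update_nil_left]
  have hnod : dB.keys.Nodup := by rw [hkeys]; exact PySem.Set.nodup_ofList _
  have hget : ∀ k, dB.getD k [] = (q.filter (fun r => r.1 == k)).map (·.2) := fun k => by
    rw [hdB, PySem.Dict.getD_foldl_modify_append, PySem.Dict.getD_empty, List.nil_append]
  rw [PySem.Dict.items_eq_map_keys dB hnod [], List.map_map,
    List.map_congr_left (fun k hk => ?_), hkeys, pvTarget]
  show (k, PySem.List.sorted (dB.getD k []) (fun x => x)) = _
  rw [hget k, pvB2]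

-- ===== VERDICT (by name: the statement is the Claim_ definition above) =====
theorem invert_network_spec : Claim_equal_invert_network := by
  intro p _
  unfold Spec_invert_network
  rw [pvA_eq_target, pvB_eq_target]
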